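-- pv_equiv track=rewrite | github.com/lukantozi/sre-systems | lab/python-execises/revision/syntax.py | digits_my
-- ===== SOURCE A (Python) =====
-- def digits_my(n):
--     if n == 0:
--         return 0
--     elif n < 0:
--         return "please enter positive value"
--     mult = 1
--
--     while n != 0:
--         fact = n % 10
--         mult *= fact
--         n //= 10
--
--     return mult
-- ===== SOURCE B (Python) =====
-- def digits_my(n):
--     if n < 0:
--         return "please enter positive value"
--     p = 1
--     for c in str(n):
--         p *= int(c)
--     return p
-- ===== Notes on version B (the rewrite author's own statement) =====
-- stated objective: idiomatic
-- what changed: Replaces the mod-10/floor-div arithmetic loop (with a special n==0 branch) by folding int(c) over the characters of str(n), relying on str(0)=='0' to yield the product 0.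
-- outside the precondition, e.g. on digits_my(-5): A returns 'please enter positive value', B returns 'please enter positive value'
import Mathlib
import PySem

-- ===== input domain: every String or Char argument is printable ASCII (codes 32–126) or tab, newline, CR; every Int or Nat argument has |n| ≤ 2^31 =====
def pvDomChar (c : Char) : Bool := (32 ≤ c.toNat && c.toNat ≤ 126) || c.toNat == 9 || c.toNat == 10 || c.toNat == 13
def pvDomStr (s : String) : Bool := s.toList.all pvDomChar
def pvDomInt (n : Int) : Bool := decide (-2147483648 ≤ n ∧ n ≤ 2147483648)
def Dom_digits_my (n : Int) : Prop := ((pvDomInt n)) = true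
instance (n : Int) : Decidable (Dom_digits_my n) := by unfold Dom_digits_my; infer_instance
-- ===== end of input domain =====

-- B changes the algorithm: fold int(c) over the characters of str(n) instead of a
-- mod-10/floor-div loop with a special n==0 branch (idiomatic; same asymptotic cost).
-- On n < 0 the Python returns a string, not an int, so Pre_ excludes negatives.

-- ===== PORT A =====
-- the 'while n != 0' loop; it is only reached with n > 0 (n == 0 and n < 0 return
-- earlier), and n stays nonnegative, so the guard '0 < n' is the same condition there.
def digitsLoopA (n mult : Int) : Int :=
  if h : 0 < n then
    digitsLoopA (PySem.Int.floordiv n 10) (mult * PySem.Int.mod n 10)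
  else mult
termination_by n.toNat
decreasing_by
  rw [PySem.Int.floordiv_eq_ediv_of_pos (by omega)]
  omega

def digits_my (n : Int) : Int :=
  if n = 0 then 0
  else if n < 0 then 0   -- Python returns the string "please enter positive value": excluded by Pre_
  else digitsLoopA n 1

-- ===== PORT B =====
-- int(c) for a single character c
def pyIntOfChar (c : Char) : Int := (PySem.Int.ofChars? [c]).getD 0

def digits_my_alt (n : Int) : Int :=
  if n < 0 then 0   -- Python returns the string "please enter positive value": excluded by Pre_
  else (PySem.Int.toChars n).foldl (fun p c => p * pyIntOfChar c) 1

-- ===== PRECONDITION & SPEC =====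
-- Pre_ excludes n < 0, where both Pythons return the message string, not an int of the declared type.
def Pre_digits_my (n : Int) : Prop := 0 ≤ n
instance (n : Int) : Decidable (Pre_digits_my n) := by unfold Pre_digits_my; infer_instance
def pvWitness_digits_my : Int := (42)

def Spec_digits_my (n : Int) (out : Int) : Prop := out = digits_my_alt n
instance (n : Int) (out : Int) : Decidable (Spec_digits_my n out) := by unfold Spec_digits_my; infer_instance

-- ===== CLAIM (what is proved, stated in full; the proofs are below) =====
def Claim_equal_digits_my : Prop := ∀ (n : Int), Dom_digits_my n → Pre_digits_my n → Spec_digits_my n (digits_my n)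

-- ===== LEMMAS AND PROOFS =====

-- A's loop on the Nat side
def natLoop (n : Nat) (mult : Int) : Int :=
  if n = 0 then mult else natLoop (n / 10) (mult * (n % 10))
decreasing_by exact Nat.div_lt_self (by omega) (by omega)

theorem digitsLoopA_eq_natLoop (n : Nat) (mult : Int) :
    digitsLoopA (n : Int) mult = natLoop n mult := by
  induction n using Nat.strong_induction_on generalizing mult with
  | _ n ih =>
    by_cases h : n = 0
    · rw [digitsLoopA, natLoop, dif_neg (by simp [h]), if_pos h]
    · have hfd : PySem.Int.floordiv (n : Int) 10 = ((n / 10 : Nat) : Int) := by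
        exact_mod_cast PySem.Int.floordiv_natCast n 10
      have hmd : PySem.Int.mod (n : Int) 10 = ((n % 10 : Nat) : Int) := by
        exact_mod_cast PySem.Int.mod_natCast n 10
      rw [digitsLoopA, natLoop, dif_pos (by exact_mod_cast Nat.pos_of_ne_zero h),
          if_neg h, hfd, hmd]
      exact ih (n / 10) (Nat.div_lt_self (Nat.pos_of_ne_zero h) (by omega)) _

theorem pyIntOfChar_digitChar (d : Nat) (hd : d < 10) :
    pyIntOfChar (Nat.digitChar d) = (d : Int) := by
  revert hd
  revert d
  decide

theorem natLoop_mul (m : Nat) : ∀ (a b : Int), natLoop m (a * b) = natLoop m a * b := by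
  induction m using Nat.strong_induction_on with
  | _ m ih =>
    intro a b
    by_cases h : m = 0
    · conv_lhs => rw [natLoop, if_pos h]
      conv_rhs => rw [natLoop, if_pos h]
    · conv_lhs => rw [natLoop, if_neg h]
      conv_rhs => rw [natLoop, if_neg h]
      rw [mul_right_comm, ih (m / 10) (Nat.div_lt_self (Nat.pos_of_ne_zero h) (by omega))]

theorem foldl_toDigitsCore (fuel : Nat) :
    ∀ (n : Nat) (ds : List Char) (init : Int), 0 < n → n < fuel →
      List.foldl (fun p c => p * pyIntOfChar c) init (Nat.toDigitsCore 10 fuel n ds)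
        = List.foldl (fun p c => p * pyIntOfChar c) (natLoop n init) ds := by
  induction fuel with
  | zero => intro n ds init _ h; omega
  | succ f ih =>
    intro n ds init hn hf
    have hnl : natLoop n init = natLoop (n / 10) (init * ((n % 10 : Nat) : Int)) := by
      rw [natLoop, if_neg (by omega)]; norm_cast
    simp only [Nat.toDigitsCore]
    by_cases h0 : n / 10 = 0
    · rw [if_pos h0, hnl, h0, List.foldl_cons,
          pyIntOfChar_digitChar (n % 10) (Nat.mod_lt n (by omega)), natLoop]
      simp
    · rw [if_neg h0]
      have h1 : n / 10 < f := by
        have := Nat.div_lt_self hn (show 1 < 10 by omega); omega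
      rw [ih (n / 10) _ _ (Nat.pos_of_ne_zero h0) h1, hnl, List.foldl_cons,
          pyIntOfChar_digitChar (n % 10) (Nat.mod_lt n (by omega)), natLoop_mul]

-- ===== VERDICT (by name: the statement is the Claim_ definition above) =====
theorem digits_my_spec : Claim_equal_digits_my := by
  intro n _ hpre
  have hpre' : (0:Int) ≤ n := hpre
  unfold Spec_digits_my digits_my digits_my_alt
  by_cases h0 : n = 0
  · subst h0; decide
  · rw [if_neg h0, if_neg (by omega), if_neg (by omega)]
    have hn : n = (n.toNat : Int) := by omega
    rw [PySem.Int.toChars, if_neg (by omega), Nat.toDigits]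
    rw [foldl_toDigitsCore (n.toNat + 1) n.toNat [] 1 (by omega) (by omega)]
    rw [hn, digitsLoopA_eq_natLoop]
    rfl
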